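-- pv_equiv track=rewrite | github.com/acchow/seadoo | p9_tools/parse/theory.py | signatures
-- ===== SOURCE A (Python) =====
-- def signatures(lines):
--     s = set()
--
--     for axiom in lines:
--         for i, char in enumerate(axiom):
--             if char == "(" and axiom[i-1].isalpha():
--                 j = i-1
--                 signature = ""
--                 # accounts for signatures containing letters, numbers and underscores
--                 while (axiom[j].isalpha() or axiom[j].isnumeric() or axiom[j] == "_") and j >= 0:
--                     signature = axiom[j] + signature    # appending letter to the front of string
--                     j -= 1
--                 if signature:
--                     s.add(signature)
--     return s
-- ===== SOURCE B (Python) =====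
-- def signatures(lines):
--     # Single forward pass per axiom: grow an identifier buffer; on '(' flush it
--     # into the set when its last char is a letter; reset on any non-identifier char.
--     s = set()
--     for axiom in lines:
--         buf = ""
--         for ch in axiom:
--             if ch.isalpha() or ch.isnumeric() or ch == "_":
--                 buf += ch
--             else:
--                 if ch == "(" and buf and buf[-1].isalpha():
--                     s.add(buf)
--                 buf = ""
--     return s
-- ===== Notes on version B (the rewrite author's own statement) =====
-- stated objective: simpler
-- what changed: A rescans backwards from every '(' to rebuild the identifier before it; B makes one forward pass per axiom maintaining the current identifier buffer and flushes it into the set at each '(' whose buffer ends in a letter.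
import Mathlib
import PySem

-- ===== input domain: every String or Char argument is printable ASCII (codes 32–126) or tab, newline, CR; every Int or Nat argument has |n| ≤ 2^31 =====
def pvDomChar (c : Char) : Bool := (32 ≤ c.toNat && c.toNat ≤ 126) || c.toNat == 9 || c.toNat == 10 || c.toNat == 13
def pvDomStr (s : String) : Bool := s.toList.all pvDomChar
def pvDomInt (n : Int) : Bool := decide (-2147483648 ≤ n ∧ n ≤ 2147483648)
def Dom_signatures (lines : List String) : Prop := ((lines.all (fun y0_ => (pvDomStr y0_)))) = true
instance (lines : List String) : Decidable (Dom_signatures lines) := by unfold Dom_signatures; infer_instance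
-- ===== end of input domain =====

-- B replaces A's per-'(' backward walk by one forward pass per axiom that maintains a
-- growing identifier buffer (objective: simpler, one linear pass instead of a rescan at every '(').

-- identifier character: letter, digit or underscore (str.isnumeric = str.isdigit on the ASCII domain)
def pvIsId (c : Char) : Bool := PySem.Chars.isalpha c || PySem.Chars.isdigit c || c == '_'

-- ===== PORT A =====
-- A's backward while loop; `k` is j+1, so the branch `k+1` examines index j = k.
-- At k = 0 (j = -1) Python probes axiom[-1] and then fails the `j >= 0` test without
-- executing the body, so the result is `sig` either way — the probe never raises because
-- the string contains the '(' that triggered the walk, hence is nonempty.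
def sigWalkA (cs : List Char) : Nat → List Char → List Char
  | 0, sig => sig
  | k+1, sig =>
      let c := (PySem.List.pyGet? cs (k : Int)).getD ' '
      if pvIsId c then sigWalkA cs k (c :: sig) else sig

-- body of A's inner `for i, char in enumerate(axiom)` loop
def sigStepA (cs : List Char) (s : PySem.Set String) (p : Int × Char) : PySem.Set String :=
  if p.2 == '(' && PySem.Chars.isalpha ((PySem.List.pyGet? cs (p.1 - 1)).getD ' ') then
    let sig := sigWalkA cs p.1.toNat []
    if sig.isEmpty then s else PySem.Set.add s (String.ofList sig)
  else s

def signatures (lines : List String) : List String :=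
  lines.foldl (fun s ax => (PySem.List.enumerate ax.toList).foldl (sigStepA ax.toList) s) []

-- ===== PORT B =====
-- body of B's forward scan: state = (set so far, current identifier buffer)
def sigStepB (st : PySem.Set String × List Char) (c : Char) : PySem.Set String × List Char :=
  if pvIsId c then (st.1, st.2 ++ [c])
  else if c == '(' && !st.2.isEmpty && PySem.Chars.isalpha (st.2.getLast?.getD ' ') then
    (PySem.Set.add st.1 (String.ofList st.2), [])
  else (st.1, [])

def signatures_alt (lines : List String) : List String :=
  lines.foldl (fun s ax => (ax.toList.foldl sigStepB (s, [])).1) []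

-- ===== PRECONDITION & SPEC =====
def Spec_signatures (lines : List String) (out : List String) : Prop := out = signatures_alt lines
instance (lines : List String) (out : List String) : Decidable (Spec_signatures lines out) := by unfold Spec_signatures; infer_instance

-- ===== CLAIM (what is proved, stated in full; the proofs are below) =====
def Claim_equal_signatures : Prop := ∀ (lines : List String), Dom_signatures lines → Spec_signatures lines (signatures lines)

-- ===== LEMMAS AND PROOFS =====

-- the maximal identifier-character suffix of a list
def idSuffix (p : List Char) : List Char := (p.reverse.takeWhile pvIsId).reverse

theorem idSuffix_concat (p : List Char) (c : Char) :
    idSuffix (p ++ [c]) = if pvIsId c then idSuffix p ++ [c] else [] := by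
  simp only [idSuffix, List.reverse_append, List.reverse_cons, List.reverse_nil, List.nil_append]
  split <;> simp_all

theorem sigWalkA_eq (cs : List Char) : ∀ (k : Nat), k ≤ cs.length → ∀ sig,
    sigWalkA cs k sig = idSuffix (cs.take k) ++ sig := by
  intro k
  induction k with
  | zero => intro _ sig; simp [sigWalkA, idSuffix]
  | succ k ih =>
    intro hk sig
    have hklt : k < cs.length := by omega
    have hget : (PySem.List.pyGet? cs (k : Int)).getD ' ' = cs[k] := by
      simp [hklt]
    have htake : cs.take (k+1) = cs.take k ++ [cs[k]] := by
      rw [List.take_add_one]; simp [hklt]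
    rw [sigWalkA]
    simp only [hget, htake, idSuffix_concat]
    by_cases h : pvIsId cs[k]
    · simp only [h, if_true]
      rw [ih (by omega) (cs[k] :: sig)]
      simp
    · simp [h]

theorem inner_eq : ∀ (rest p : List Char) (s : PySem.Set String),
    (PySem.List.enumerate rest (p.length : Int)).foldl (sigStepA (p ++ rest)) s
      = (rest.foldl sigStepB (s, idSuffix p)).1 := by
  intro rest
  induction rest with
  | nil => intro p s; simp [PySem.List.enumerate_nil]
  | cons c rest ih =>
    intro p s
    rw [PySem.List.enumerate_cons, List.foldl_cons, List.foldl_cons]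
    have hassoc : p ++ c :: rest = (p ++ [c]) ++ rest := by simp
    have hlen : ((p ++ [c]).length : Int) = (p.length : Int) + 1 := by simp
    have hstep : sigStepA (p ++ c :: rest) s ((p.length : Int), c)
        = (sigStepB (s, idSuffix p) c).1 ∧
        idSuffix (p ++ [c]) = (sigStepB (s, idSuffix p) c).2 := by
      by_cases hid : pvIsId c
      · -- identifier char: c ≠ '(' so A does nothing; B extends the buffer
        have hne : (c == '(') = false := by
          by_cases h : c = '('
          · subst h; exact absurd hid (by decide)
          · simp [h]
        constructor
        · simp [sigStepA, sigStepB, hne, hid]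
        · simp [sigStepB, hid, idSuffix_concat]
      · -- non-identifier char: B resets the buffer; both add iff c = '(' and the
        -- char just before the buffer's end is a letter
        have hid' : pvIsId c = false := by revert hid; cases pvIsId c <;> simp
        have hbuf2 : (sigStepB (s, idSuffix p) c).2 = [] := by
          simp only [sigStepB, hid', Bool.false_eq_true, if_false]
          split <;> rfl
        refine ⟨?_, by rw [hbuf2, idSuffix_concat]; simp [hid']⟩
        by_cases hpar : c = '('
        · subst hpar
          rcases List.eq_nil_or_concat p with rfl | ⟨q, l, hp⟩
          · -- p = []: index -1 probes the last char of the whole string, but the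
            -- collected signature is empty, so A adds nothing; B's buffer is empty
            simp [sigStepA, sigWalkA, sigStepB, hid', idSuffix]
          · rw [List.concat_eq_append] at hp; subst hp
            -- p = q ++ [l]
            have hprev : (PySem.List.pyGet? (q ++ l :: '(' :: rest)
                ((q.length : Int))).getD ' ' = l := by
              rw [show q ++ l :: '(' :: rest = q ++ (l :: '(' :: rest) from rfl,
                PySem.List.pyGet?_append_length]
              rfl
            have hwalk : sigWalkA (q ++ l :: '(' :: rest) (q.length + 1) []
                = idSuffix (q ++ [l]) := by
              rw [show q ++ l :: '(' :: rest = (q ++ [l]) ++ '(' :: rest by simp,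
                show q.length + 1 = (q ++ [l]).length by simp,
                sigWalkA_eq _ _ (by simp) [], List.take_left, List.append_nil]
            by_cases hl : pvIsId l
            · have hsfx : idSuffix (q ++ [l]) = idSuffix q ++ [l] := by
                rw [idSuffix_concat]; simp [hl]
              have hlast : (idSuffix (q ++ [l])).getLast?.getD ' ' = l := by
                rw [hsfx, List.getLast?_concat]; rfl
              have hnonempty : (idSuffix (q ++ [l])).isEmpty = false := by
                rw [hsfx]; simp
              by_cases ha : PySem.Chars.isalpha l
              · simp [sigStepA, sigStepB, hwalk, hid', ha, hlast, hnonempty]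
              · simp [sigStepA, sigStepB, hid', ha, hlast, hnonempty]
            · -- last char of p not an identifier char: buffer empty, no add on either side
              have ha : PySem.Chars.isalpha l = false := by
                revert hl; simp [pvIsId]; intro h _ _; exact h
              have hsfx : idSuffix (q ++ [l]) = [] := by
                rw [idSuffix_concat]; simp [hl]
              simp [sigStepA, sigStepB, hid', ha, hsfx]
        · -- other punctuation: neither side adds
          have hne : (c == '(') = false := by simp [hpar]
          simp [sigStepA, sigStepB, hne, hid']
    rw [hstep.1]
    have hpair : sigStepB (s, idSuffix p) c
        = ((sigStepB (s, idSuffix p) c).1, idSuffix (p ++ [c])) := by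
      rw [hstep.2]
    conv_rhs => rw [hpair]
    rw [hassoc, ← hlen]
    exact ih (p ++ [c]) ((sigStepB (s, idSuffix p) c).1)

theorem per_line (ax : String) (s : PySem.Set String) :
    (PySem.List.enumerate ax.toList).foldl (sigStepA ax.toList) s
      = (ax.toList.foldl sigStepB (s, [])).1 := by
  have := inner_eq ax.toList [] s
  simpa [idSuffix] using this

theorem top_eq : ∀ (L : List String) (s : PySem.Set String),
    L.foldl (fun s ax => (PySem.List.enumerate ax.toList).foldl (sigStepA ax.toList) s) s
      = L.foldl (fun s ax => (ax.toList.foldl sigStepB (s, [])).1) s := by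
  intro L
  induction L with
  | nil => intro s; rfl
  | cons ax L ih => intro s; rw [List.foldl_cons, List.foldl_cons, per_line, ih]

-- ===== VERDICT (by name: the statement is the Claim_ definition above) =====
theorem signatures_spec : Claim_equal_signatures := by
  intro lines _
  unfold Spec_signatures signatures signatures_alt
  exact top_eq lines []
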